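-- pv_equiv track=rewrite | github.com/zfmandell/the-workshop | peak_merge_replicates_I.py | peak_clean
-- ===== SOURCE A (Python) =====
-- def peak_clean(lyst):
--     return_list = []
--     set_list = sorted(set(lyst))
--     for item in set_list:
--         try:
--             if item < set_list[set_list.index(item)+1]-3:
--                 return_list.append(item)
--         except IndexError:
--             pass
--     return return_list
-- ===== SOURCE B (Python) =====
-- def peak_clean(lyst):
--     s = set(lyst)
--     if not s:
--         return []
--     m = max(s)
--     return sorted(x for x in s
--                   if x != m and x + 1 not in s and x + 2 not in s and x + 3 not in s)
-- ===== Notes on version B (the rewrite author's own statement) =====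
-- stated objective: faster
-- what changed: Replaces A's per-item linear set_list.index scan over the sorted list with direct hash-set membership tests: since values are integers, the sorted successor exceeds x+3 exactly when x is not the maximum and none of x+1, x+2, x+3 is in the set; only the surviving elements are sorted.
import Mathlib
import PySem

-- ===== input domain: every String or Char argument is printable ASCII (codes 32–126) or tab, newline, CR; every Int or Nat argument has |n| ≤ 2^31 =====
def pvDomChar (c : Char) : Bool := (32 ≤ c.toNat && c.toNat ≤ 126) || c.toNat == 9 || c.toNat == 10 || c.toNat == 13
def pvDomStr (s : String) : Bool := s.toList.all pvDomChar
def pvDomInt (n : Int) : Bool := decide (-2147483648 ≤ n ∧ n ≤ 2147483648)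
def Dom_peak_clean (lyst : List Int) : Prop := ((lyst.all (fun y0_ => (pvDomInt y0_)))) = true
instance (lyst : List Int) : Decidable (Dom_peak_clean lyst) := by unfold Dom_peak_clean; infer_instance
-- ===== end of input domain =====

-- B replaces A's per-item linear `set_list.index` scan with hash-set membership tests
-- (keep x iff x is not the maximum and x+1, x+2, x+3 are all absent), faster.

-- ===== PORT A =====
def peak_clean (lyst : List Int) : List Int :=
  let set_list := PySem.List.sorted (PySem.Set.ofList lyst) (fun x => x) false
  set_list.foldl (fun return_list item =>
    match PySem.List.index? set_list item with
    | none => return_list   -- unreachable: item is drawn from set_list (ValueError cannot occur)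
    | some i =>
      match PySem.List.pyGet? set_list ((i : Int) + 1) with
      | none => return_list   -- IndexError → pass
      | some nxt => if item < nxt - 3 then return_list ++ [item] else return_list) []

-- ===== PORT B =====
def peak_clean_alt (lyst : List Int) : List Int :=
  match PySem.List.max? (PySem.Set.ofList lyst) (fun x => x) with
  | none => []                    -- `if not s: return []`
  | some m =>
    PySem.List.sorted
      ((PySem.Set.ofList lyst).filter (fun x =>
        decide (x ≠ m) && !(PySem.Set.contains (PySem.Set.ofList lyst) (x + 1))
          && !(PySem.Set.contains (PySem.Set.ofList lyst) (x + 2))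
          && !(PySem.Set.contains (PySem.Set.ofList lyst) (x + 3))))
      (fun x => x) false

-- ===== PRECONDITION & SPEC =====
def Spec_peak_clean (lyst : List Int) (out : List Int) : Prop := out = peak_clean_alt lyst
instance (lyst : List Int) (out : List Int) : Decidable (Spec_peak_clean lyst out) := by unfold Spec_peak_clean; infer_instance

-- ===== CLAIM (what is proved, stated in full; the proofs are below) =====
def Claim_equal_peak_clean : Prop := ∀ (lyst : List Int), Dom_peak_clean lyst → Spec_peak_clean lyst (peak_clean lyst)

-- ===== LEMMAS AND PROOFS =====

-- A's loop keeps exactly the left elements of adjacent pairs with gap > 3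
def pvPairs (t : List Int) : List Int :=
  ((t.zip t.tail).filter (fun p => p.2 - p.1 > 3)).map Prod.fst

theorem pvIndex?_getElem_of_nodup (s : List Int) (h : s.Nodup) (k : Nat) (hk : k < s.length) :
    PySem.List.index? s s[k] = some k := by
  rw [PySem.List.index?_eq_some_iff]
  refine ⟨s.take k, s.drop (k + 1), ?_, ?_, ?_⟩
  · rw [← List.drop_eq_getElem_cons hk, List.take_append_drop]
  · simp [List.length_take, Nat.min_eq_left hk.le]
  · intro hmem
    obtain ⟨j, hj, hje⟩ := List.getElem_of_mem hmem
    have hj' : j < k ∧ j < s.length := by simpa using hj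
    have : s[j]'hj'.2 = s[k] := by rw [← hje]; simp [List.getElem_take]
    have := (List.Nodup.getElem_inj_iff h).mp this
    omega

theorem pvLoop_eq (s : List Int) (h : s.Nodup) (k : Nat) (acc : List Int) :
    (s.drop k).foldl (fun return_list item =>
      match PySem.List.index? s item with
      | none => return_list
      | some i =>
        match PySem.List.pyGet? s ((i : Int) + 1) with
        | none => return_list
        | some nxt => if item < nxt - 3 then return_list ++ [item] else return_list) acc
    = acc ++ pvPairs (s.drop k) := by
  by_cases hk : k < s.length
  · have hdrop : s.drop k = s[k] :: s.drop (k + 1) := List.drop_eq_getElem_cons hk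
    rw [hdrop, List.foldl_cons, pvIndex?_getElem_of_nodup s h k hk]
    have hcast : ((k : Int) + 1) = (((k + 1 : Nat)) : Int) := by push_cast; ring
    simp only [hcast, PySem.List.pyGet?_natCast]
    by_cases hk1 : k + 1 < s.length
    · have hdrop1 : s.drop (k + 1) = s[k + 1] :: s.drop (k + 2) := List.drop_eq_getElem_cons hk1
      simp only [List.getElem?_eq_getElem hk1]
      have hP : pvPairs (s[k] :: s.drop (k + 1)) =
          (if s[k + 1] - s[k] > 3 then [s[k]] else []) ++ pvPairs (s.drop (k + 1)) := by
        simp only [pvPairs, hdrop1, List.tail_cons, List.zip_cons_cons, List.filter_cons]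
        by_cases hc : s[k + 1] - s[k] > 3 <;> simp [hc]
      rw [hP]
      by_cases hc : s[k] < s[k + 1] - 3
      · rw [if_pos hc, pvLoop_eq s h (k + 1), if_pos (by omega : s[k + 1] - s[k] > 3)]
        simp
      · rw [if_neg hc, pvLoop_eq s h (k + 1), if_neg (by omega : ¬ s[k + 1] - s[k] > 3)]
        simp
    · have hnil : s.drop (k + 1) = [] := List.drop_eq_nil_of_le (by omega)
      rw [List.getElem?_eq_none (by omega), hnil]
      simp [pvPairs]
  · have : s.drop k = [] := List.drop_eq_nil_of_le (by omega)
    simp [this, pvPairs]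
termination_by s.length - k
decreasing_by all_goals omega

-- On a strictly increasing list T with maximum m, B's membership predicate selects
-- exactly the left elements of adjacent pairs with gap > 3, suffix by suffix.
theorem pvFilter_eq (T : List Int) (hT : T.Pairwise (· < ·)) (m : Int)
    (hmem : m ∈ T) (hub : ∀ x ∈ T, x ≤ m) (P : Int → Bool)
    (hP : ∀ x ∈ T, (P x = true ↔ (x ≠ m ∧ (x + 1) ∉ T ∧ (x + 2) ∉ T ∧ (x + 3) ∉ T))) :
    ∀ (suf pre : List Int), T = pre ++ suf → suf.filter P = pvPairs suf := by
  intro suf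
  induction suf with
  | nil => intro pre hpre; simp [pvPairs]
  | cons a tail ih =>
    intro pre hpre
    have haT : a ∈ T := by rw [hpre]; simp
    have hpw := hT
    rw [hpre, List.pairwise_append] at hpw
    obtain ⟨hpreP, hsufP, hcross⟩ := hpw
    cases tail with
    | nil =>
      -- a is the last element, hence a = m and P a = false
      have ham : a = m := by
        have hm' : m ∈ pre ++ [a] := by rw [hpre] at hmem; exact hmem
        rcases List.mem_append.mp hm' with h' | h'
        · exact absurd (hub a haT) (by have := hcross m h' a (by simp); omega)
        · exact (List.mem_singleton.mp h').symm
      have hPa : P a = false := by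
        rcases Bool.eq_false_or_eq_true (P a) with h | h
        · exact absurd ((hP a haT).mp h).1 (by simp [ham])
        · exact h
      simp [hPa, pvPairs]
    | cons b rest =>
      have hbT : b ∈ T := by rw [hpre]; simp
      have hab : a < b := by
        have := List.pairwise_cons.mp hsufP
        exact this.1 b (by simp)
      have hrest : ∀ y ∈ rest, b < y := by
        have := List.pairwise_cons.mp (List.pairwise_cons.mp hsufP).2
        exact this.1
      have hprelt : ∀ y ∈ pre, y < a := fun y hy => hcross y hy a (by simp)
      -- a+i ∈ T ↔ a+i = b ∨ a+i ∈ rest  (for i ≥ 1)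
      have hmemT : ∀ i : Int, 1 ≤ i → ((a + i) ∈ T ↔ (a + i) = b ∨ (a + i) ∈ rest) := by
        intro i hi
        rw [hpre]
        constructor
        · intro h
          rcases List.mem_append.mp h with h' | h'
          · exact absurd (hprelt _ h') (by omega)
          · rw [List.mem_cons, List.mem_cons] at h'
            rcases h' with h' | h' | h'
            · omega
            · exact Or.inl h'
            · exact Or.inr h'
        · intro h
          rcases h with h | h
          · rw [h]; simp
          · simp [h]
      have hPab : (P a = true) ↔ b - a > 3 := by
        rw [hP a haT]
        constructor
        · intro ⟨_, h1, h2, h3⟩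
          by_contra hc
          have hb3 : b = a + 1 ∨ b = a + 2 ∨ b = a + 3 := by omega
          rcases hb3 with h | h | h
          · exact h1 ((hmemT 1 (by omega)).mpr (Or.inl (by omega)))
          · exact h2 ((hmemT 2 (by omega)).mpr (Or.inl (by omega)))
          · exact h3 ((hmemT 3 (by omega)).mpr (Or.inl (by omega)))
        · intro hgap
          have hnotin : ∀ i : Int, 1 ≤ i → i ≤ 3 → (a + i) ∉ T := by
            intro i h1 h3 hin
            rcases (hmemT i h1).mp hin with h | h
            · omega
            · exact absurd (hrest _ h) (by omega)
          refine ⟨?_, hnotin 1 (by omega) (by omega), hnotin 2 (by omega) (by omega),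
                  hnotin 3 (by omega) (by omega)⟩
          intro ham
          exact absurd (hub b hbT) (by omega)
      have htail := ih (pre ++ [a]) (by rw [hpre]; simp)
      have hPv : pvPairs (a :: b :: rest) =
          (if b - a > 3 then [a] else []) ++ pvPairs (b :: rest) := by
        simp only [pvPairs, List.tail_cons, List.zip_cons_cons, List.filter_cons]
        by_cases hc : b - a > 3 <;> simp [hc]
      rw [hPv, List.filter_cons, htail]
      by_cases hc : b - a > 3
      · rw [if_pos (hPab.mpr hc), if_pos hc]
        rfl
      · rw [if_neg (fun h => hc (hPab.mp h)), if_neg hc]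
        simp

-- ===== VERDICT (by name: the statement is the Claim_ definition above) =====
theorem peak_clean_spec : Claim_equal_peak_clean := by
  intro lyst _
  unfold Spec_peak_clean
  have hlt : (PySem.List.sorted (PySem.Set.ofList lyst) (fun x => x) false).Pairwise (· < ·) :=
    PySem.List.sorted_ofList_pairwise_lt lyst
  have hperm : (PySem.List.sorted (PySem.Set.ofList lyst) (fun x => x) false).Perm
      (PySem.Set.ofList lyst) := PySem.List.sorted_perm (PySem.Set.ofList lyst) (fun x => x) false
  have hnd : (PySem.List.sorted (PySem.Set.ofList lyst) (fun x => x) false).Nodup :=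
    hperm.nodup_iff.mpr (PySem.Set.nodup_ofList lyst)
  have hA : peak_clean lyst = pvPairs (PySem.List.sorted (PySem.Set.ofList lyst) (fun x => x) false) := by
    have h0 := pvLoop_eq (PySem.List.sorted (PySem.Set.ofList lyst) (fun x => x) false) hnd 0 []
    simp only [List.drop_zero, List.nil_append] at h0
    simpa [peak_clean] using h0
  rw [hA]
  unfold peak_clean_alt
  cases hmax : PySem.List.max? (PySem.Set.ofList lyst) (fun x => x) with
  | none =>
    have hsnil : PySem.Set.ofList lyst = [] :=
      (PySem.List.max?_eq_none_iff (PySem.Set.ofList lyst) (fun x => x)).mp hmax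
    simp [hsnil, pvPairs, PySem.List.sorted]
  | some m =>
    have hmemS : m ∈ PySem.Set.ofList lyst := PySem.List.max?_mem hmax
    have hubS : ∀ y ∈ PySem.Set.ofList lyst, y ≤ m := PySem.List.max?_isMax hmax
    have hmemT : m ∈ PySem.List.sorted (PySem.Set.ofList lyst) (fun x => x) false :=
      hperm.mem_iff.mpr hmemS
    have hubT : ∀ y ∈ PySem.List.sorted (PySem.Set.ofList lyst) (fun x => x) false, y ≤ m :=
      fun y hy => hubS y (hperm.subset hy)
    have hPchar : ∀ x ∈ PySem.List.sorted (PySem.Set.ofList lyst) (fun x => x) false,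
        (((fun x => decide (x ≠ m) && !(PySem.Set.contains (PySem.Set.ofList lyst) (x + 1))
            && !(PySem.Set.contains (PySem.Set.ofList lyst) (x + 2))
            && !(PySem.Set.contains (PySem.Set.ofList lyst) (x + 3))) x) = true ↔
          (x ≠ m ∧ (x + 1) ∉ PySem.List.sorted (PySem.Set.ofList lyst) (fun x => x) false
            ∧ (x + 2) ∉ PySem.List.sorted (PySem.Set.ofList lyst) (fun x => x) false
            ∧ (x + 3) ∉ PySem.List.sorted (PySem.Set.ofList lyst) (fun x => x) false)) := by
      intro x _
      have hm : ∀ y : Int, y ∈ PySem.Set.ofList lyst ↔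
          y ∈ PySem.List.sorted (PySem.Set.ofList lyst) (fun x => x) false :=
        fun y => hperm.mem_iff.symm
      simp only [Bool.and_eq_true, decide_eq_true_eq, Bool.not_eq_true']
      simp [and_assoc]
    have hfilT := pvFilter_eq (PySem.List.sorted (PySem.Set.ofList lyst) (fun x => x) false)
      hlt m hmemT hubT _ hPchar (PySem.List.sorted (PySem.Set.ofList lyst) (fun x => x) false) [] rfl
    have hpermF := hperm.filter (fun x => decide (x ≠ m)
      && !(PySem.Set.contains (PySem.Set.ofList lyst) (x + 1))
      && !(PySem.Set.contains (PySem.Set.ofList lyst) (x + 2))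
      && !(PySem.Set.contains (PySem.Set.ofList lyst) (x + 3)))
    have hsortedF : (List.filter (fun x => decide (x ≠ m)
        && !(PySem.Set.contains (PySem.Set.ofList lyst) (x + 1))
        && !(PySem.Set.contains (PySem.Set.ofList lyst) (x + 2))
        && !(PySem.Set.contains (PySem.Set.ofList lyst) (x + 3)))
        (PySem.List.sorted (PySem.Set.ofList lyst) (fun x => x) false)).Pairwise
        (fun a b => (fun x => x) a < (fun x => x) b) :=
    List.Pairwise.sublist List.filter_sublist hlt
    have hsortEq := PySem.List.sorted_eq_of_perm_of_pairwise_lt _ _ (fun x : Int => x)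
      hpermF hsortedF
    simp only [hsortEq, hfilT]
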